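-- pv_equiv track=rewrite | github.com/contractAnalysis/SmartExecutor | fdg/lists_merge.py | merge_2_list
-- ===== SOURCE A (Python) =====
-- def merge_2_list(a, b) -> list:
--     a1 = []  # temporarily save elements in a that are not matched with element in b
--     b1 = []  # temporarily save elements in b that are not matched with element in a
--     c = []  # save the combined result
--
--     if len(b) == 0:
--         c = a
--         return c
--     if len(a) == 0:
--         c = b
--         return c
--     j = 0
--     while j < len(b):
--         flag = True
--         for i in range(len(a)):
--             if b[j] == a[i]:
--                 # add elements to c
--                 if len(a1) > 0:
--                     c += a1
--                     a1 = []
--                 if len(b1) > 0: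
--                     c += b1
--                     b1 = []
--                 c.append(a[i])
--                 # update a
--                 a = a[i + 1:]  # remove elements that already moved to c
--                 # check if either a or b reaches end
--                 if len(a) == 0:
--                     if j < len(b) - 1:
--                         c += b[j + 1:]
--                     return c
--                 else:
--                     if j == len(b) - 1:
--                         c += a
--                         return c
--                     else:  # both a and b still do not reach end, go to the next iteration
--                         j += 1
--                 flag = False
--                 break
--             else:  # do not match, save a[i] to a1
--                 a1.append(a[i])
--
--         if flag:
--             if j < len(b) - 1:
--                 a1 = []
--                 b1.append(b[j])
--                 j += 1
--             else:
--                 c += a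
--                 c += b1
--                 c.append(b[j])
--                 return c
-- ===== SOURCE B (Python) =====
-- def merge_2_list(a, b) -> list:
--     # One pass over b with a value->count table of the not-yet-consumed suffix of a:
--     # a membership test is O(1), and successful scans advance a single pointer over
--     # disjoint ranges of a, so the whole merge is amortized O(len(a) + len(b)).
--     if not b:
--         return a
--     if not a:
--         return b
--     cnt = {}
--     for x in a:
--         cnt[x] = cnt.get(x, 0) + 1
--     out = []
--     pending = []
--     pos = 0
--     last = len(b) - 1
--     for j, x in enumerate(b):
--         if cnt.get(x, 0) > 0:
--             i = a.index(x, pos)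
--             for y in a[pos:i + 1]:
--                 cnt[y] -= 1
--             out += a[pos:i]
--             out += pending
--             pending = []
--             out.append(x)
--             pos = i + 1
--             if pos == len(a):
--                 return out + b[j + 1:]
--             if j == last:
--                 return out + a[pos:]
--         else:
--             if j == last:
--                 return out + a[pos:] + pending + [x]
--             pending.append(x)
-- ===== Notes on version B (the rewrite author's own statement) =====
-- stated objective: faster
-- what changed: A rescans (and re-slices) the whole remaining list a for every element of b; B builds a value-to-count table of the unconsumed suffix of a once, so a failed match is an O(1) counter lookup and successful matches advance a single pointer over disjoint ranges of a, giving one amortized-linear pass.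
import Mathlib
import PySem

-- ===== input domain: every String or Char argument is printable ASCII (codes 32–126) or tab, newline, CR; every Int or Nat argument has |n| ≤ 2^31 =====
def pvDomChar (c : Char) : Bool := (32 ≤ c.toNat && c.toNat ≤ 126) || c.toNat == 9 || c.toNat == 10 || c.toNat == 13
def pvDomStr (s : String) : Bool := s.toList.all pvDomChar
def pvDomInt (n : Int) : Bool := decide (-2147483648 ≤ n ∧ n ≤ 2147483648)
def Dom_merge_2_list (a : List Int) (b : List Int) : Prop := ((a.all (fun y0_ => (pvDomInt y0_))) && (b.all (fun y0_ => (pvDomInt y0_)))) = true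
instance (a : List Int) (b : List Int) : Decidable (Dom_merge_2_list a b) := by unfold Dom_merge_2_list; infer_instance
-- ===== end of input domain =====

-- B replaces A's quadratic rescan of `a` for every element of `b` by a value→count table of the
-- not-yet-consumed suffix of `a` plus a single advancing pointer (objective: faster).

-- ===== PORT A =====
-- A's inner `for i in range(len(a))`: scan `a` accumulating the unmatched prefix a1;
-- `some (a1, rest)` at the first i with b[j] == a[i] (rest = a[i+1:]), `none` if the scan ends (flag stays True).
def mergeScanA (bj : Int) (a1 : List Int) (a : List Int) : Option (List Int × List Int) :=
  match a with
  | [] => none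
  | x :: r => if bj = x then some (a1, r) else mergeScanA bj (a1 ++ [x]) r

-- A's `while j < len(b)` loop; state: remaining a, output c, buffer b1 (a1 is [] at each loop top).
def mergeLoopA (b : List Int) (a : List Int) (j : Nat) (c : List Int) (b1 : List Int) : List Int :=
  if _h : j < b.length then
    let bj := b.getD j 0   -- b[j], in range
    match mergeScanA bj [] a with
    | some (a1, a') =>
      let c1 := if 0 < a1.length then c ++ a1 else c
      let c2 := if 0 < b1.length then c1 ++ b1 else c1
      let c3 := c2 ++ [bj]
      if a'.length = 0 then
        if j < b.length - 1 then c3 ++ b.drop (j + 1) else c3   -- b[j+1:]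
      else if j = b.length - 1 then c3 ++ a'
      else mergeLoopA b a' (j + 1) c3 []
    | none =>
      if j < b.length - 1 then mergeLoopA b a (j + 1) c (b1 ++ [bj])
      else c ++ a ++ b1 ++ [bj]
  else c   -- unreachable: the loop body always returns before j reaches len(b)
termination_by b.length - j
decreasing_by all_goals omega

def merge_2_list (a : List Int) (b : List Int) : List Int :=
  if b.length = 0 then a
  else if a.length = 0 then b
  else mergeLoopA b a 0 [] []

-- ===== PORT B =====
-- B's `for j, x in enumerate(b)` loop; pos is the pointer into a, cnt counts a[pos:].
def mergeLoopB (a : List Int) (b : List Int) (last : Nat) (j : Nat) (pos : Nat)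
    (cnt : PySem.Dict Int Int) (out : List Int) (pending : List Int) : List Int :=
  if _h : j < b.length then
    let x := b.getD j 0   -- b[j], in range
    if 0 < cnt.getD x 0 then
      -- i = a.index(x, pos): first index ≥ pos holding x; exact here since the counter guarantees x ∈ a[pos:]
      let i := pos + (a.drop pos).idxOf x
      -- for y in a[pos:i+1]: cnt[y] -= 1   (every such y is a key of cnt, so get(y,0) is exact)
      let cnt' := ((a.drop pos).take (i + 1 - pos)).foldl (fun d y => d.modify y 0 (· - 1)) cnt
      let out1 := out ++ (a.drop pos).take (i - pos)   -- a[pos:i]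
      let out2 := out1 ++ pending
      let out3 := out2 ++ [x]
      if i + 1 = a.length then out3 ++ b.drop (j + 1)   -- b[j+1:]
      else if j = last then out3 ++ a.drop (i + 1)      -- a[pos:]
      else mergeLoopB a b last (j + 1) (i + 1) cnt' out3 []
    else
      if j = last then out ++ a.drop pos ++ pending ++ [x]
      else mergeLoopB a b last (j + 1) pos cnt out (pending ++ [x])
  else out   -- unreachable: the loop always returns at j = last
termination_by b.length - j
decreasing_by all_goals omega

def merge_2_list_alt (a : List Int) (b : List Int) : List Int :=
  if b.length = 0 then a
  else if a.length = 0 then b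
  else
    -- cnt[x] = cnt.get(x, 0) + 1  over a
    let cnt := a.foldl (fun d x => d.modify x 0 (· + 1)) PySem.Dict.empty
    mergeLoopB a b (b.length - 1) 0 0 cnt [] []

-- ===== PRECONDITION & SPEC =====
def Spec_merge_2_list (a : List Int) (b : List Int) (out : List Int) : Prop := out = merge_2_list_alt a b
instance (a : List Int) (b : List Int) (out : List Int) : Decidable (Spec_merge_2_list a b out) := by unfold Spec_merge_2_list; infer_instance

-- ===== CLAIM (what is proved, stated in full; the proofs are below) =====
def Claim_equal_merge_2_list : Prop := ∀ (a : List Int) (b : List Int), Dom_merge_2_list a b → Spec_merge_2_list a b (merge_2_list a b)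

-- ===== LEMMAS AND PROOFS =====

lemma append_guard (c l : List Int) : (if 0 < l.length then c ++ l else c) = c ++ l := by
  cases l <;> simp

lemma mergeScanA_spec (x : Int) (s acc : List Int) :
    mergeScanA x acc s =
      if x ∈ s then some (acc ++ s.take (s.idxOf x), s.drop (s.idxOf x + 1)) else none := by
  induction s generalizing acc with
  | nil => simp [mergeScanA]
  | cons y t ih =>
    by_cases hxy : x = y
    · subst hxy
      simp [mergeScanA]
    · have hyx : (y == x) = false := by simp [Ne.symm hxy]
      by_cases hm : x ∈ t <;>
        simp [mergeScanA, hxy, ih, List.idxOf_cons, hyx, hm, List.append_assoc]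

lemma getD_foldl_modify_sub_one (l : List Int) (d : PySem.Dict Int Int) (v : Int) :
    (l.foldl (fun d y => d.modify y 0 (· - 1)) d).getD v 0 = d.getD v 0 - (l.count v : Int) := by
  induction l generalizing d with
  | nil => simp
  | cons y t ih =>
    simp only [List.foldl_cons, ih, PySem.Dict.getD_modify, List.count_cons]
    by_cases hv : v = y
    · subst hv; simp; ring
    · have : (y == v) = false := by simp [Ne.symm hv]
      simp [hv, this]

lemma mergeLoop_eq (a b : List Int) :
    ∀ (k j pos : Nat) (c pending : List Int) (cnt : PySem.Dict Int Int),
      b.length - j = k → pos < a.length →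
      (∀ v, cnt.getD v 0 = ((a.drop pos).count v : Int)) →
      mergeLoopA b (a.drop pos) j c pending = mergeLoopB a b (b.length - 1) j pos cnt c pending := by
  intro k
  induction k with
  | zero =>
    intro j pos c pending cnt hk _ _
    have hj : ¬ j < b.length := by omega
    rw [mergeLoopA, mergeLoopB]
    simp [hj]
  | succ k ih =>
    intro j pos c pending cnt hk hpos hcnt
    have hj : j < b.length := by omega
    have hs : 0 < (a.drop pos).length := by simp; omega
    set s := a.drop pos with hsdef
    set x := b.getD j 0 with hxdef
    by_cases hx : x ∈ s
    · -- match branch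
      have hcx : (0:Int) < cnt.getD x 0 := by
        rw [hcnt x]; exact_mod_cast List.count_pos_iff.mpr hx
      set K := s.idxOf x with hKdef
      have hK : K < s.length := List.idxOf_lt_length_of_mem hx
      have hKa : pos + K + 1 ≤ a.length := by
        have : s.length = a.length - pos := by simp [hsdef]
        omega
      have hscan : mergeScanA x [] s = some (s.take K, s.drop (K + 1)) := by
        rw [mergeScanA_spec, if_pos hx, List.nil_append, ← hKdef]
      have hdrop : s.drop (K + 1) = a.drop (pos + K + 1) := by
        rw [hsdef, List.drop_drop]; ring_nf
      have hlen : (s.drop (K + 1)).length = a.length - (pos + K + 1) := by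
        rw [hdrop]; simp
      rw [mergeLoopA, mergeLoopB]
      simp only [dif_pos hj, ← hxdef, ← hsdef, hscan, if_pos hcx]
      have e1 : pos + K + 1 - pos = K + 1 := by omega
      have e2 : pos + K - pos = K := by omega
      simp only [← hKdef, e1, e2, append_guard]
      by_cases hempty : (s.drop (K + 1)).length = 0
      · have hpe : pos + K + 1 = a.length := by omega
        simp only [hempty, hpe]
        by_cases hlast : j < b.length - 1
        · simp [hlast, List.append_assoc]
        · have : b.drop (j + 1) = [] := by
            have : b.length ≤ j + 1 := by omega
            simp [this]
          simp [hlast, this, List.append_assoc]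
      · have hpe : ¬ pos + K + 1 = a.length := by omega
        simp only [hempty, if_neg hpe]
        by_cases hlast : j = b.length - 1
        · simp [hlast, hdrop, List.append_assoc]
        · simp only [hlast, if_false]
          have := ih (j + 1) (pos + K + 1)
            (c ++ s.take K ++ pending ++ [x]) []
            (((a.drop pos).take (K + 1)).foldl (fun d y => d.modify y 0 (· - 1)) cnt)
            (by omega) (by omega)
            (by intro v
                rw [getD_foldl_modify_sub_one, hcnt v]
                have hsplit : s.count v = (s.take (K + 1)).count v + (s.drop (K + 1)).count v := by
                  conv_lhs => rw [← List.take_append_drop (K + 1) s]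
                  rw [List.count_append]
                rw [← hdrop, ← hsdef]
                push_cast [hsplit]; ring)
          rw [← hsdef] at this
          rw [hdrop, this]
    · -- no-match branch
      have hcx : ¬ (0:Int) < cnt.getD x 0 := by
        rw [hcnt x]
        simp [List.count_eq_zero_of_not_mem hx]
      have hscan : mergeScanA x [] s = none := by
        rw [mergeScanA_spec]; simp [hx]
      rw [mergeLoopA, mergeLoopB]
      simp only [dif_pos hj, ← hxdef, ← hsdef, hscan, if_neg hcx]
      by_cases hlast : j < b.length - 1
      · have hne : ¬ j = b.length - 1 := by omega
        simp only [if_pos hlast, if_neg hne]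
        exact ih (j + 1) pos c (pending ++ [x]) cnt (by omega) hpos hcnt
      · have heq : j = b.length - 1 := by omega
        simp [heq, List.append_assoc]

theorem merge_eq (a b : List Int) : merge_2_list a b = merge_2_list_alt a b := by
  unfold merge_2_list merge_2_list_alt
  by_cases hb : b.length = 0
  · simp [hb]
  · by_cases ha : a.length = 0
    · simp [hb, ha]
    · simp only [hb, ha, if_false]
      have h0 : a.drop 0 = a := a.drop_zero
      have := mergeLoop_eq a b (b.length) 0 0 [] []
        (a.foldl (fun d x => d.modify x 0 (· + 1)) PySem.Dict.empty)
        (by omega) (by omega)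
        (by intro v
            simp [PySem.Dict.getD_foldl_modify_add_one, h0])
      rw [← h0]; exact this

-- ===== VERDICT (by name: the statement is the Claim_ definition above) =====
theorem merge_2_list_spec : Claim_equal_merge_2_list := by
  intro a b _
  unfold Spec_merge_2_list
  exact merge_eq a b
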